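-- pv_equiv track=rewrite | github.com/maazjadoon/MachineLearning-Project-Final | packet_capture.py | _tcp_flags_to_int
-- ===== SOURCE A (Python) =====
-- def _tcp_flags_to_int(flags) -> int:
--     """Convert Scapy TCP flags to integer representation"""
--     flag_map = {
--         'F': 1,   # FIN
--         'S': 2,   # SYN
--         'R': 4,   # RST
--         'P': 8,   # PSH
--         'A': 16,  # ACK
--         'U': 32,  # URG
--     }
--
--     flags_str = str(flags)
--     result = 0
--     for flag_char, flag_value in flag_map.items():
--         if flag_char in flags_str:
--             result |= flag_value
--     return result
-- ===== SOURCE B (Python) =====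
-- def _tcp_flags_to_int(flags) -> int:
--     """Convert Scapy TCP flags to integer representation"""
--     flag_map = {
--         'F': 1,   # FIN
--         'S': 2,   # SYN
--         'R': 4,   # RST
--         'P': 8,   # PSH
--         'A': 16,  # ACK
--         'U': 32,  # URG
--     }
--
--     result = 0
--     for c in str(flags):
--         result |= flag_map.get(c, 0)
--     return result
-- ===== Notes on version B (the rewrite author's own statement) =====
-- stated objective: idiomatic
-- what changed: B iterates over the characters of the input string OR-ing in a dict lookup per character, instead of A's loop over the six fixed flag_map entries with a substring membership test per entry.
import Mathlib
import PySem

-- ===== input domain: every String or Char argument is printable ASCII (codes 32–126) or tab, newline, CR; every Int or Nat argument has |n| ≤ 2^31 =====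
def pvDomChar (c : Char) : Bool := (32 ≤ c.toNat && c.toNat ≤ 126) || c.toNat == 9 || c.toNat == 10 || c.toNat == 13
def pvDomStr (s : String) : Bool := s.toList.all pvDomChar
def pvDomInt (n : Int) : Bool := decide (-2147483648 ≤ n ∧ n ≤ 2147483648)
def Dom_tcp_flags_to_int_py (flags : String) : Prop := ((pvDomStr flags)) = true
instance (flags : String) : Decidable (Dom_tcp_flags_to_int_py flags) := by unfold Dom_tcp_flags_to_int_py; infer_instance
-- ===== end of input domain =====

-- B drives the accumulation from the input's characters (one dict lookup each) instead of
-- A's loop over the six flag_map entries with a substring test; objective: more idiomatic, same cost.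

-- ===== PORT A =====
-- the dict literal flag_map (shared by both Pythons)
def pvFlagMap : PySem.Dict Char Int :=
  PySem.Dict.ofList [('F', 1), ('S', 2), ('R', 4), ('P', 8), ('A', 16), ('U', 32)]

-- for flag_char, flag_value in flag_map.items(): if flag_char in flags_str: result |= flag_value
def tcp_flags_to_int_py (flags : String) : Int :=
  (PySem.Dict.items pvFlagMap).foldl
    (fun result fv =>
      if PySem.Str.isIn (String.ofList [fv.1]) flags then PySem.Int.bor result fv.2 else result)
    0

-- ===== PORT B =====
-- for c in str(flags): result |= flag_map.get(c, 0)
def tcp_flags_to_int_py_alt (flags : String) : Int :=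
  flags.toList.foldl (fun result c => PySem.Int.bor result (PySem.Dict.getD pvFlagMap c 0)) 0

-- ===== PRECONDITION & SPEC =====
def Spec_tcp_flags_to_int_py (flags : String) (out : Int) : Prop := out = tcp_flags_to_int_py_alt flags
instance (flags : String) (out : Int) : Decidable (Spec_tcp_flags_to_int_py flags out) := by unfold Spec_tcp_flags_to_int_py; infer_instance

-- ===== CLAIM (what is proved, stated in full; the proofs are below) =====
def Claim_equal_tcp_flags_to_int_py : Prop := ∀ (flags : String), Dom_tcp_flags_to_int_py flags → Spec_tcp_flags_to_int_py flags (tcp_flags_to_int_py flags)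

-- ===== LEMMAS AND PROOFS =====

-- the common value, as a function of the six membership booleans, in A's accumulation shape
def pvF (b1 b2 b3 b4 b5 b6 : Bool) : Int :=
  let r1 := if b1 then PySem.Int.bor 0 1 else 0
  let r2 := if b2 then PySem.Int.bor r1 2 else r1
  let r3 := if b3 then PySem.Int.bor r2 4 else r2
  let r4 := if b4 then PySem.Int.bor r3 8 else r3
  let r5 := if b5 then PySem.Int.bor r4 16 else r4
  if b6 then PySem.Int.bor r5 32 else r5

def pvCanon (l : List Char) : Int :=
  pvF (l.contains 'F') (l.contains 'S') (l.contains 'R') (l.contains 'P') (l.contains 'A') (l.contains 'U')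

lemma pv_decide_comm (a b : Char) : decide (a = b) = decide (b = a) := by
  simp [eq_comm]

lemma pv_isIn_single (c : Char) (s : String) :
    PySem.Str.isIn (String.ofList [c]) s = s.toList.contains c := by
  have hiff := PySem.Str.isIn_iff_infix (String.ofList [c]) s
  rw [show (String.ofList [c]).toList = [c] from by simp, List.singleton_infix_iff] at hiff
  apply Bool.eq_iff_iff.mpr
  rw [hiff]
  simp [List.contains_eq_mem]

set_option maxHeartbeats 1600000 in
lemma pvA_eq (flags : String) : tcp_flags_to_int_py flags = pvCanon flags.toList := by
  have hitems : PySem.Dict.items pvFlagMap =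
      [('F', (1:Int)), ('S', 2), ('R', 4), ('P', 8), ('A', 16), ('U', 32)] := rfl
  simp only [tcp_flags_to_int_py, hitems, List.foldl, pv_isIn_single, pvCanon, pvF]

-- OR-ing one flag bit into the accumulator, in terms of the six booleans (finite check)
lemma pv_bor1 : ∀ b1 b2 b3 b4 b5 b6 : Bool, PySem.Int.bor (pvF b1 b2 b3 b4 b5 b6) 1 = pvF true b2 b3 b4 b5 b6 := by decide
lemma pv_bor2 : ∀ b1 b2 b3 b4 b5 b6 : Bool, PySem.Int.bor (pvF b1 b2 b3 b4 b5 b6) 2 = pvF b1 true b3 b4 b5 b6 := by decide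
lemma pv_bor4 : ∀ b1 b2 b3 b4 b5 b6 : Bool, PySem.Int.bor (pvF b1 b2 b3 b4 b5 b6) 4 = pvF b1 b2 true b4 b5 b6 := by decide
lemma pv_bor8 : ∀ b1 b2 b3 b4 b5 b6 : Bool, PySem.Int.bor (pvF b1 b2 b3 b4 b5 b6) 8 = pvF b1 b2 b3 true b5 b6 := by decide
lemma pv_bor16 : ∀ b1 b2 b3 b4 b5 b6 : Bool, PySem.Int.bor (pvF b1 b2 b3 b4 b5 b6) 16 = pvF b1 b2 b3 b4 true b6 := by decide
lemma pv_bor32 : ∀ b1 b2 b3 b4 b5 b6 : Bool, PySem.Int.bor (pvF b1 b2 b3 b4 b5 b6) 32 = pvF b1 b2 b3 b4 b5 true := by decide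

-- one step of B's loop updates the membership booleans
lemma pv_step (b1 b2 b3 b4 b5 b6 : Bool) (c : Char) :
    PySem.Int.bor (pvF b1 b2 b3 b4 b5 b6) (PySem.Dict.getD pvFlagMap c 0) =
      pvF (b1 || (c == 'F')) (b2 || (c == 'S')) (b3 || (c == 'R'))
          (b4 || (c == 'P')) (b5 || (c == 'A')) (b6 || (c == 'U')) := by
  by_cases h1 : c = 'F'; · subst h1; simpa using pv_bor1 b1 b2 b3 b4 b5 b6
  by_cases h2 : c = 'S'; · subst h2; simpa using pv_bor2 b1 b2 b3 b4 b5 b6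
  by_cases h3 : c = 'R'; · subst h3; simpa using pv_bor4 b1 b2 b3 b4 b5 b6
  by_cases h4 : c = 'P'; · subst h4; simpa using pv_bor8 b1 b2 b3 b4 b5 b6
  by_cases h5 : c = 'A'; · subst h5; simpa using pv_bor16 b1 b2 b3 b4 b5 b6
  by_cases h6 : c = 'U'; · subst h6; simpa using pv_bor32 b1 b2 b3 b4 b5 b6
  have hg : PySem.Dict.getD pvFlagMap c 0 = 0 := by
    simp [PySem.Dict.getD, PySem.Dict.get?,
      show PySem.Dict.items pvFlagMap = [('F', (1:Int)), ('S', 2), ('R', 4), ('P', 8), ('A', 16), ('U', 32)] from rfl,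
      Ne.symm h1, Ne.symm h2, Ne.symm h3, Ne.symm h4, Ne.symm h5, Ne.symm h6]
  simp [hg, PySem.Int.bor_zero, Bool.beq_eq_decide_eq, h1, h2, h3, h4, h5, h6]

lemma pvB_fold : ∀ (l : List Char) (b1 b2 b3 b4 b5 b6 : Bool),
    l.foldl (fun result c => PySem.Int.bor result (PySem.Dict.getD pvFlagMap c 0)) (pvF b1 b2 b3 b4 b5 b6) =
      pvF (b1 || l.contains 'F') (b2 || l.contains 'S') (b3 || l.contains 'R')
          (b4 || l.contains 'P') (b5 || l.contains 'A') (b6 || l.contains 'U') := by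
  intro l
  induction l with
  | nil => simp
  | cons c l ih =>
    intro b1 b2 b3 b4 b5 b6
    rw [List.foldl_cons, pv_step, ih]
    simp [Bool.or_assoc, Bool.beq_eq_decide_eq, pv_decide_comm]

lemma pvB_eq (flags : String) : tcp_flags_to_int_py_alt flags = pvCanon flags.toList := by
  have h := pvB_fold flags.toList false false false false false false
  rw [show pvF false false false false false false = (0 : Int) from rfl] at h
  rw [tcp_flags_to_int_py_alt, h]
  simp [pvCanon]

-- ===== VERDICT (by name: the statement is the Claim_ definition above) =====
theorem tcp_flags_to_int_py_spec : Claim_equal_tcp_flags_to_int_py := by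
  intro flags _
  show tcp_flags_to_int_py flags = tcp_flags_to_int_py_alt flags
  rw [pvA_eq, pvB_eq]
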